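-- pv_equiv track=rewrite | github.com/zyzshishui/miles | miles/utils/test_utils/mock_trajectories.py | _split_turns
-- ===== SOURCE A (Python) =====
-- from typing import Any
--
-- def _split_turns(messages: list[dict[str, Any]]) -> list[tuple[list[dict], dict]]:
--     """Split a full message sequence into (request_messages, assistant_message) pairs.
--
--     Each assistant message marks the end of one turn.
--     """
--     turns: list[tuple[list[dict], dict]] = []
--     accumulated: list[dict] = []
--
--     i = 0
--     # Collect non-assistant prefix (system, user)
--     while i < len(messages) and messages[i]["role"] != "assistant":
--         accumulated.append(messages[i])
--         i += 1
--
--     while i < len(messages):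
--         assert messages[i]["role"] == "assistant", f"Expected assistant at index {i}, got {messages[i]['role']}"
--         assistant_msg = messages[i]
--         turns.append((list(accumulated), assistant_msg))
--         accumulated.append(assistant_msg)
--         i += 1
--
--         # Collect subsequent tool (or user for multi-user) messages
--         while i < len(messages) and messages[i]["role"] != "assistant":
--             accumulated.append(messages[i])
--             i += 1
--
--     return turns
-- ===== SOURCE B (Python) =====
-- def _split_turns(messages):
--     """Split a full message sequence into (request_messages, assistant_message) pairs.
--
--     Each assistant message marks the end of one turn.
--     """
--     return [(messages[:i], m)
--             for i, m in enumerate(messages)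
--             if m["role"] == "assistant"]
-- ===== Notes on version B (the rewrite author's own statement) =====
-- stated objective: simpler
-- what changed: B drops A's accumulator and two-phase nested while loops entirely: one comprehension over enumerate(messages) emits (messages[:i], m) for each assistant message, since the accumulated prefix at an assistant at index i is exactly messages[:i].
import Mathlib
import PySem

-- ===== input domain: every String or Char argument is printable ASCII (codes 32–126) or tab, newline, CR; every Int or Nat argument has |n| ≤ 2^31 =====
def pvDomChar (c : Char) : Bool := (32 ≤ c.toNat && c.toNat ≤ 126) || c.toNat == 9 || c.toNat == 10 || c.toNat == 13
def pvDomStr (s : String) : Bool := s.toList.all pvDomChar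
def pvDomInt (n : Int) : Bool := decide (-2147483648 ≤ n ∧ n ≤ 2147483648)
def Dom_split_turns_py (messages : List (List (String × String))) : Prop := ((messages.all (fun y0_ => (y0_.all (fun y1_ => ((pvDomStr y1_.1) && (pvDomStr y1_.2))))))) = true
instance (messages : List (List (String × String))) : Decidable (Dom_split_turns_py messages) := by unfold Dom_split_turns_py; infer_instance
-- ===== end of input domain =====

-- B replaces A's accumulator and two-phase nested while loops by a single pass that
-- slices the original list at each assistant message (objective: simpler).

-- m["role"]; the KeyError case (no "role" key) is excluded by Pre_split_turns_py,
-- so the total getD form is exact on the admitted inputs.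
def pvRole (m : List (String × String)) : String := (PySem.Dict.mk m).getD "role" ""

-- ===== PORT A =====
-- inner 'while i < len(messages) and messages[i]["role"] != "assistant": accumulated.append(...)'
def pvSkip (msgs acc : List (List (String × String))) :
    List (List (String × String)) × List (List (String × String)) :=
  match msgs with
  | [] => (acc, [])
  | m :: rest => if pvRole m == "assistant" then (acc, m :: rest) else pvSkip rest (acc ++ [m])

-- needed by pvOuter's termination proof
theorem pvSkip_snd_length_le (msgs acc : List (List (String × String))) :
    (pvSkip msgs acc).2.length ≤ msgs.length := by
  induction msgs generalizing acc with
  | nil => simp [pvSkip]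
  | cons m rest ih =>
    simp only [pvSkip]
    split
    · simp
    · exact le_trans (ih _) (by simp)

-- the outer 'while i < len(messages)' loop of A
def pvOuter (msgs acc : List (List (String × String)))
    (turns : List ((List (List (String × String))) × (List (String × String)))) :
    List ((List (List (String × String))) × (List (String × String))) :=
  match msgs with
  | [] => turns
  | m :: rest =>
    let s := pvSkip rest (acc ++ [m])
    pvOuter s.2 s.1 (turns ++ [(acc, m)])
termination_by msgs.length
decreasing_by
  have := pvSkip_snd_length_le rest (acc ++ [m])
  simp only [List.length_cons]
  omega

def split_turns_py (messages : List (List (String × String))) :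
    List ((List (List (String × String))) × (List (String × String))) :=
  let p := pvSkip messages []
  pvOuter p.2 p.1 []

-- ===== PORT B =====
-- [(messages[:i], m) for i, m in enumerate(messages) if m["role"] == "assistant"]
def split_turns_py_alt (messages : List (List (String × String))) :
    List ((List (List (String × String))) × (List (String × String))) :=
  (PySem.List.enumerate messages 0).filterMap
    (fun im => if pvRole im.2 == "assistant"
               then some (PySem.List.slice messages none (some im.1), im.2)
               else none)

-- ===== PRECONDITION & SPEC =====
-- Pre_ excludes exactly the inputs where some message has no "role" key: there A
-- (and B alike) raises KeyError.
def Pre_split_turns_py (messages : List (List (String × String))) : Prop :=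
  (messages.all (fun m => ((PySem.Dict.mk m).get? "role").isSome)) = true
instance (messages : List (List (String × String))) : Decidable (Pre_split_turns_py messages) := by unfold Pre_split_turns_py; infer_instance

def pvWitness_split_turns_py : (List (List (String × String))) :=
  [[("role", "system"), ("content", "s")],
   [("role", "user"), ("content", "hi")],
   [("role", "assistant"), ("content", "yo")],
   [("role", "tool"), ("content", "t")],
   [("role", "assistant"), ("content", "done")]]

def Spec_split_turns_py (messages : List (List (String × String))) (out : List ((List (List (String × String))) × (List (String × String)))) : Prop := out = split_turns_py_alt messages
instance (messages : List (List (String × String))) (out : List ((List (List (String × String))) × (List (String × String)))) : Decidable (Spec_split_turns_py messages out) := by unfold Spec_split_turns_py; infer_instance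

-- ===== CLAIM (what is proved, stated in full; the proofs are below) =====
def Claim_equal_split_turns_py : Prop := ∀ (messages : List (List (String × String))), Dom_split_turns_py messages → Pre_split_turns_py messages → Spec_split_turns_py messages (split_turns_py messages)

-- ===== LEMMAS AND PROOFS =====

-- common reference function: fused single pass carrying the prefix
def pvRef (acc msgs : List (List (String × String))) :
    List ((List (List (String × String))) × (List (String × String))) :=
  match msgs with
  | [] => []
  | m :: rest =>
    if pvRole m == "assistant" then (acc, m) :: pvRef (acc ++ [m]) rest
    else pvRef (acc ++ [m]) rest

theorem pvRef_skip (msgs acc : List (List (String × String))) :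
    pvRef (pvSkip msgs acc).1 (pvSkip msgs acc).2 = pvRef acc msgs := by
  induction msgs generalizing acc with
  | nil => simp [pvSkip]
  | cons m rest ih =>
    by_cases h : pvRole m == "assistant"
    · simp [pvSkip, h]
    · simp [pvSkip, h, pvRef, ih]

theorem pvSkip_snd_head (msgs acc : List (List (String × String))) :
    (pvSkip msgs acc).2 = [] ∨
      ∃ m rest, (pvSkip msgs acc).2 = m :: rest ∧ (pvRole m == "assistant") = true := by
  induction msgs generalizing acc with
  | nil => simp [pvSkip]
  | cons m rest ih =>
    by_cases h : pvRole m == "assistant"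
    · exact Or.inr ⟨m, rest, by simp [pvSkip, h], h⟩
    · simpa [pvSkip, h] using ih (acc ++ [m])

theorem pvOuter_eq_ref (n : Nat) :
    ∀ (msgs acc : List (List (String × String))) turns, msgs.length ≤ n →
    (msgs = [] ∨ ∃ m rest, msgs = m :: rest ∧ (pvRole m == "assistant") = true) →
    pvOuter msgs acc turns = turns ++ pvRef acc msgs := by
  induction n with
  | zero =>
    intro msgs acc turns hlen _
    have : msgs = [] := List.eq_nil_of_length_eq_zero (Nat.le_zero.mp hlen)
    subst this; simp [pvOuter, pvRef]
  | succ n ih =>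
    intro msgs acc turns hlen hinv
    rcases hinv with h | ⟨m, rest, rfl, hq⟩
    · subst h; simp [pvOuter, pvRef]
    · have hs := pvSkip_snd_length_le rest (acc ++ [m])
      rw [pvOuter, ih _ _ _ (by simp at hlen; omega) (pvSkip_snd_head rest (acc ++ [m]))]
      simp [pvRef, hq, pvRef_skip]

theorem split_turns_py_eq_ref (messages : List (List (String × String))) :
    split_turns_py messages = pvRef [] messages := by
  unfold split_turns_py
  rw [pvOuter_eq_ref (pvSkip messages []).2.length _ _ _ le_rfl
        (pvSkip_snd_head messages []), pvRef_skip]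
  simp

theorem pvAlt_gen (suf : List (List (String × String))) :
    ∀ (pre messages : List (List (String × String))), messages = pre ++ suf →
    (PySem.List.enumerate suf (pre.length : Int)).filterMap
      (fun im => if pvRole im.2 == "assistant"
                 then some (PySem.List.slice messages none (some im.1), im.2)
                 else none) = pvRef pre suf := by
  induction suf with
  | nil => intro pre messages _; simp [PySem.List.enumerate_nil, pvRef]
  | cons m rest ih =>
    intro pre messages hmsg
    have htake : PySem.List.slice messages none (some (pre.length : Int)) = pre := by
      rw [PySem.List.slice_to_natCast, hmsg, List.take_left]
    have ihx := ih (pre ++ [m]) messages (by simp [hmsg])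
    have hcast : (((pre ++ [m]).length : Nat) : Int) = (pre.length : Int) + 1 := by
      simp
    rw [hcast] at ihx
    rw [PySem.List.enumerate_cons, List.filterMap_cons]
    by_cases h : pvRole m == "assistant"
    all_goals simp [h, pvRef, htake]
    all_goals (simp only [beq_iff_eq] at ihx; exact ihx)

theorem split_turns_py_alt_eq_ref (messages : List (List (String × String))) :
    split_turns_py_alt messages = pvRef [] messages := by
  simpa [split_turns_py_alt] using pvAlt_gen messages [] messages rfl

-- ===== VERDICT (by name: the statement is the Claim_ definition above) =====
theorem split_turns_py_spec : Claim_equal_split_turns_py := by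
  intro messages _ _
  unfold Spec_split_turns_py
  rw [split_turns_py_eq_ref, split_turns_py_alt_eq_ref]
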